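-- pv_equiv track=rewrite | github.com/RicardoMicale/Daily-Byte | Recursividad/KaprekarNumber.py | checkKaprekar
-- ===== SOURCE A (Python) =====
-- KAPREKAR = 6174
--
-- def highToLow(number: str) -> int:
--   digits = [char for char in number]
--   digits.sort(reverse=True)
--   stringDigits = ''.join(digits)
--   return int(stringDigits)
--
-- def lowToHigh(number: str) -> int:
--   digits = [char for char in number]
--   digits.sort()
--   stringDigits = ''.join(digits)
--   return int(stringDigits)
--
-- def checkKaprekar(number: int) -> bool:
--   if number < 0:
--     return False
--
--   descending: int = highToLow(str(number))
--   ascending: int = lowToHigh(str(number))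
--
--   if descending == ascending:
--     return False
--   if (number / 1000 >= 10) or (number / 1000 < 1):
--     return False
--
--   newNumber = descending - ascending
--
--   if(newNumber == KAPREKAR):
--     return True
--   else:
--     return checkKaprekar(newNumber)
-- ===== SOURCE B (Python) =====
-- KAPREKAR = 6174
--
-- def checkKaprekar(number: int) -> bool:
--   # Iterative digit-counting reformulation: a counting pass replaces the
--   # string sorts, and a while loop replaces the tail recursion.
--   while True:
--     if number < 0:
--       return False
--     counts = [0] * 10
--     n = number
--     if n == 0:
--       counts[0] = 1
--     while n > 0:
--       counts[n % 10] += 1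
--       n //= 10
--     if counts.count(0) == 9:   # all digits equal <=> descending would equal ascending
--       return False
--     if number < 1000 or number > 9999:
--       return False
--     asc = 0
--     for d, c in enumerate(counts):
--       for _ in range(c):
--         asc = asc * 10 + d
--     desc = 0
--     for d, c in reversed(list(enumerate(counts))):
--       for _ in range(c):
--         desc = desc * 10 + d
--     newNumber = desc - asc
--     if newNumber == KAPREKAR:
--       return True
--     number = newNumber
-- ===== Notes on version B (the rewrite author's own statement) =====
-- stated objective: alternative
-- what changed: Replaces the tail recursion with a while loop and replaces the two string-sort helpers (sorted digits of str(number), joined and re-parsed by int) with a single arithmetic digit-counting pass from which the ascending/descending numbers are rebuilt directly; the all-digits-equal test and the range guard are done on the counts and on the integer itself, no strings at all.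
import Mathlib
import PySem

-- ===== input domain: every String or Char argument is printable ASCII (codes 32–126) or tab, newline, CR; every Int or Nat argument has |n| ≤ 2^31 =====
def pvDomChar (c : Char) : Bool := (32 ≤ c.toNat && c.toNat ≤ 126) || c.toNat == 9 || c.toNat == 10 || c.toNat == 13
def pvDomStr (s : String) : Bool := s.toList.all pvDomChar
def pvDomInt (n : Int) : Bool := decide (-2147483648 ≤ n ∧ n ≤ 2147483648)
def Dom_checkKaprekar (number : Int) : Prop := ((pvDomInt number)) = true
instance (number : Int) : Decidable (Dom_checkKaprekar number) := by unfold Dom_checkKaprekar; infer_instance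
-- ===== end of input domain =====

-- B replaces A's tail recursion and per-pass string sorts by a while loop over a
-- digit-count table (objective: alternative decomposition, no strings/sorting).

-- ===== PORT A =====
def highToLow (number : String) : Int :=
  let digits : List Char := number.toList
  let digits := PySem.List.sorted digits (fun c => c) true
  -- stringDigits = ''.join(digits); int(stringDigits): ported together as ofChars?
  -- on the joined characters (exact; a nonempty digit string here, never ValueError)
  (PySem.Int.ofChars? digits).getD 0

def lowToHigh (number : String) : Int :=
  let digits : List Char := number.toList
  let digits := PySem.List.sorted digits (fun c => c) false
  -- ''.join + int() as ofChars?, as in highToLow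
  (PySem.Int.ofChars? digits).getD 0

-- fuel only makes the recursion total; both ports run with the same fuel 30.
def checkKaprekarRec : Nat → Int → Bool
  | 0, _ => false
  | fuel+1, number =>
    if number < 0 then false
    else
      let descending : Int := highToLow (PySem.Int.toStr number)
      let ascending : Int := lowToHigh (PySem.Int.toStr number)
      if descending = ascending then false
      -- (number / 1000 >= 10) or (number / 1000 < 1): float '/' is exact on these
      -- integer bounds for |number| ≤ 2^31, so it is the integer range test below
      else if 10000 ≤ number ∨ number < 1000 then false
      else
        let newNumber := descending - ascending
        if newNumber = 6174 then true
        else checkKaprekarRec fuel newNumber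

def checkKaprekar (number : Int) : Bool := checkKaprekarRec 30 number

-- ===== PORT B =====
-- counts[i] += 1
def incrAt (cs : List Nat) (i : Nat) : List Nat := cs.set i (cs.getD i 0 + 1)

-- while n > 0: counts[n % 10] += 1; n //= 10   (fuel n₀ ≥ number of digits)
def countLoop : Nat → Nat → List Nat → List Nat
  | 0, _, counts => counts
  | fuel+1, n, counts =>
    if n = 0 then counts else countLoop fuel (n / 10) (incrAt counts (n % 10))

-- for d, c in enumerate(counts): for _ in range(c): asc = asc * 10 + d
def buildAsc (counts : List Nat) : Int :=
  (PySem.List.enumerate counts).foldl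
    (fun acc dc => (List.range dc.2).foldl (fun a _ => a * 10 + dc.1) acc) 0

-- for d, c in reversed(list(enumerate(counts))): for _ in range(c): desc = desc * 10 + d
def buildDesc (counts : List Nat) : Int :=
  ((PySem.List.enumerate counts).reverse).foldl
    (fun acc dc => (List.range dc.2).foldl (fun a _ => a * 10 + dc.1) acc) 0

-- while True: … (fuel 30 as in port A; never exhausted)
def checkKaprekarLoop : Nat → Int → Bool
  | 0, _ => false
  | fuel+1, number =>
    if number < 0 then false
    else
      let counts : List Nat := List.replicate 10 0
      let counts := if number = 0 then counts.set 0 1 else counts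
      let counts := countLoop number.toNat number.toNat counts
      if PySem.List.count counts 0 = 9 then false
      else if number < 1000 ∨ 9999 < number then false
      else
        let newNumber := buildDesc counts - buildAsc counts
        if newNumber = 6174 then true
        else checkKaprekarLoop fuel newNumber

def checkKaprekar_alt (number : Int) : Bool := checkKaprekarLoop 30 number

-- ===== PRECONDITION & SPEC =====
def Spec_checkKaprekar (number : Int) (out : Bool) : Prop := out = checkKaprekar_alt number
instance (number : Int) (out : Bool) : Decidable (Spec_checkKaprekar number out) := by unfold Spec_checkKaprekar; infer_instance

-- ===== CLAIM (what is proved, stated in full; the proofs are below) =====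
def Claim_equal_checkKaprekar : Prop := ∀ (number : Int), Dom_checkKaprekar number → Spec_checkKaprekar number (checkKaprekar number)

-- ===== LEMMAS AND PROOFS =====

lemma tdc_step (f n : Nat) (l : List Char) (h : ¬ n / 10 = 0) :
    Nat.toDigitsCore 10 (f+1) n l = Nat.toDigitsCore 10 f (n / 10) (Nat.digitChar (n % 10) :: l) := by
  simp [Nat.toDigitsCore, h]

lemma tdc_last (f n : Nat) (l : List Char) (h : n / 10 = 0) :
    Nat.toDigitsCore 10 (f+1) n l = Nat.digitChar (n % 10) :: l := by
  simp [Nat.toDigitsCore, h]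

lemma toChars_four (n : Int) (h1 : 1000 ≤ n) (h2 : n ≤ 9999) :
    PySem.Int.toChars n =
      [Nat.digitChar (n.toNat / 1000), Nat.digitChar (n.toNat / 100 % 10),
       Nat.digitChar (n.toNat / 10 % 10), Nat.digitChar (n.toNat % 10)] := by
  have hn : ¬ n < 0 := by omega
  have hb1 : 1000 ≤ n.toNat := by omega
  have hb2 : n.toNat ≤ 9999 := by omega
  simp only [PySem.Int.toChars, if_neg hn, Nat.toDigits]
  generalize hm : n.toNat = m at *
  rw [tdc_step m m [] (by omega)]
  rw [show m = (m-1)+1 by omega, tdc_step _ _ _ (by omega)]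
  rw [show m-1 = (m-2)+1 by omega, tdc_step _ _ _ (by omega)]
  rw [show m-2 = (m-3)+1 by omega, tdc_last _ _ _ (by omega)]
  rw [show m - 3 + 1 + 1 + 1 = m from by omega]
  rw [show m / 10 / 10 / 10 % 10 = m / 1000 from by omega]
  rw [show m / 10 / 10 % 10 = m / 100 % 10 from by omega]

lemma cl_zero (f : Nat) (cs : List Nat) : countLoop f 0 cs = cs := by
  cases f <;> simp [countLoop]

lemma cl_step (f n : Nat) (cs : List Nat) (h : ¬ n = 0) :
    countLoop (f+1) n cs = countLoop f (n / 10) (incrAt cs (n % 10)) := by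
  simp [countLoop, h]

lemma cl_four (f m : Nat) (cs : List Nat) (hf : 4 ≤ f) (h1 : 1000 ≤ m) (h2 : m ≤ 9999) :
    countLoop f m cs =
      incrAt (incrAt (incrAt (incrAt cs (m % 10)) (m / 10 % 10)) (m / 100 % 10)) (m / 1000) := by
  obtain ⟨g, rfl⟩ : ∃ g, f = g + 4 := ⟨f - 4, by omega⟩
  rw [show g + 4 = (g+3)+1 from rfl, cl_step _ _ _ (by omega)]
  rw [cl_step _ _ _ (by omega)]
  rw [cl_step _ _ _ (by omega)]
  rw [cl_step _ _ _ (by omega)]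
  rw [show m / 10 / 10 = m / 100 from by omega]
  rw [show m / 100 / 10 = m / 1000 from by omega]
  rw [show m / 1000 / 10 = 0 from by omega]
  rw [cl_zero]
  rw [show m / 1000 % 10 = m / 1000 from by omega]

-- the per-pass facts, as one decidable statement over the four digits
def finalOK (a b c d : Nat) : Bool :=
  let chars := [Nat.digitChar a, Nat.digitChar b, Nat.digitChar c, Nat.digitChar d]
  let cnt := incrAt (incrAt (incrAt (incrAt (List.replicate 10 0) d) c) b) a
  ((PySem.Int.ofChars? (PySem.List.sorted chars (fun c => c) true)).getD 0 == buildDesc cnt)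
  && ((PySem.Int.ofChars? (PySem.List.sorted chars (fun c => c) false)).getD 0 == buildAsc cnt)
  && (((PySem.Int.ofChars? (PySem.List.sorted chars (fun c => c) true)).getD 0
        == (PySem.Int.ofChars? (PySem.List.sorted chars (fun c => c) false)).getD 0)
      == (PySem.List.count cnt 0 == 9))

set_option maxRecDepth 40000 in
set_option maxHeartbeats 4000000 in
lemma finalOK_all :
    ((List.range 9).all fun a => (List.range 10).all fun b =>
      (List.range 10).all fun c => (List.range 10).all fun d =>
        finalOK (a+1) b c d) = true := by decide

lemma finalOK_true (a b c d : Nat) (ha1 : 1 ≤ a) (ha : a ≤ 9) (hb : b ≤ 9) (hc : c ≤ 9) (hd : d ≤ 9) :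
    finalOK a b c d = true := by
  have h := finalOK_all
  rw [List.all_eq_true] at h
  have h := h (a-1) (List.mem_range.mpr (by omega))
  rw [List.all_eq_true] at h
  have h := h b (List.mem_range.mpr (by omega))
  rw [List.all_eq_true] at h
  have h := h c (List.mem_range.mpr (by omega))
  rw [List.all_eq_true] at h
  have h := h d (List.mem_range.mpr (by omega))
  rwa [show a - 1 + 1 = a by omega] at h

lemma loop_eq (f : Nat) : ∀ n, checkKaprekarRec f n = checkKaprekarLoop f n := by
  induction f with
  | zero => intro n; rfl
  | succ f ih =>
    intro n
    simp only [checkKaprekarRec, checkKaprekarLoop]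
    by_cases h0 : n < 0
    · simp [h0]
    · simp only [if_neg h0]
      by_cases hr : 1000 ≤ n ∧ n ≤ 9999
      · obtain ⟨hr1, hr2⟩ := hr
        have hne : ¬ n = 0 := by omega
        have hfo := finalOK_true (n.toNat / 1000) (n.toNat / 100 % 10) (n.toNat / 10 % 10) (n.toNat % 10)
          (by omega) (by omega) (by omega) (by omega) (by omega)
        simp only [finalOK, Bool.and_eq_true, beq_iff_eq] at hfo
        obtain ⟨⟨hD, hA⟩, hI⟩ := hfo
        have hga : ¬ ((10000 : Int) ≤ n ∨ n < 1000) := by omega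
        have hgb : ¬ (n < 1000 ∨ (9999 : Int) < n) := by omega
        have hchars : (PySem.Int.toStr n).toList =
            [Nat.digitChar (n.toNat / 1000), Nat.digitChar (n.toNat / 100 % 10),
             Nat.digitChar (n.toNat / 10 % 10), Nat.digitChar (n.toNat % 10)] := by
          rw [PySem.Int.toList_toStr, toChars_four n hr1 hr2]
        have hcnt := cl_four n.toNat n.toNat (List.replicate 10 0) (by omega) (by omega) (by omega)
        simp only [highToLow, lowToHigh, hchars, if_neg hne, hcnt, hD, hA, if_neg hga, if_neg hgb]
        rw [hD, hA] at hI
        set C := incrAt (incrAt (incrAt (incrAt (List.replicate 10 0) (n.toNat % 10)) (n.toNat / 10 % 10)) (n.toNat / 100 % 10)) (n.toNat / 1000) with hCdef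
        by_cases hq : PySem.List.count C 0 = 9
        · have hbd : buildDesc C = buildAsc C := by
            rw [show (PySem.List.count C 0 == 9) = true from by simpa using hq] at hI
            simpa using hI
          rw [if_pos hbd, if_pos hq]
        · have hbd : ¬ buildDesc C = buildAsc C := by
            rw [show (PySem.List.count C 0 == 9) = false from by simpa using hq] at hI
            simpa using hI
          rw [if_neg hbd, if_neg hq]
          by_cases h6 : buildDesc C - buildAsc C = 6174
          · rw [if_pos h6, if_pos h6]
          · rw [if_neg h6, if_neg h6]
            exact ih _
      · have hga : (10000 : Int) ≤ n ∨ n < 1000 := by omega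
        have hgb : n < 1000 ∨ (9999 : Int) < n := by omega
        simp [hga, hgb]

-- ===== VERDICT (by name: the statement is the Claim_ definition above) =====
theorem checkKaprekar_spec : Claim_equal_checkKaprekar := by
  intro n _
  unfold Spec_checkKaprekar checkKaprekar checkKaprekar_alt
  exact loop_eq 30 n
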